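-- pv_equiv track=rewrite | github.com/sanskrit-lexicon/PWK | pwkissues/issue88/meta/check_tags.py | make_outarr_2
-- ===== SOURCE A (Python) =====
-- def make_outarr_2(asdict):
--  # local abbreviations (space in <X> = key)
--  keys = asdict.keys()
--  keys = sorted(keys)
--  outarr = []
--  ntot = 0
--  outarr.append('') # will replace with ntot
--  for key in keys:
--   if key.startswith('</'):
--    # skip closing tags
--    continue
--   asobj = asdict[key]
--   if ' ' not in key:
--    # skip tags that have no attributes
--    continue
--   ntot = ntot + asdict[key]
--   out = "%s   %5d " %(key,asobj)
--   outarr.append(out)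
--  outarr[0] = '%s Total tags with attributes' % ntot
--  return outarr
-- ===== SOURCE B (Python) =====
-- def _insort(lines, k, v):
--     # Return lines with (k, v) inserted after every pair whose key is <= k
--     # (keys are unique, so this keeps lines strictly sorted by key).
--     for i in range(len(lines)):
--         if not (lines[i][0] <= k):
--             return lines[:i] + [(k, v)] + lines[i:]
--     return lines + [(k, v)]
--
--
-- def make_outarr_2(asdict):
--     # Online insertion sort: one pass over the items, keeping the relevant
--     # (key, value) pairs in a sorted list as we meet them; no sorted(), no
--     # key lookups, no placeholder backfill.  Format everything at the end.
--     lines = []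
--     ntot = 0
--     for k, v in asdict.items():
--         if k.startswith('</') or ' ' not in k:
--             continue
--         ntot += v
--         lines = _insort(lines, k, v)
--     return ['%s Total tags with attributes' % ntot] + \
--            ['%s   %5d ' % (k, v) for k, v in lines]
-- ===== Notes on version B (the rewrite author's own statement) =====
-- stated objective: alternative
-- what changed: Replaces A's sort-all-keys-then-loop-with-dict-lookups-and-placeholder-backfill by an online insertion sort: one pass over the items that inserts each relevant (key,value) pair into a list kept sorted, summing on the way, with all formatting done at the end (no sorted() over all keys, no lookups, no index-0 backfill).
import Mathlib
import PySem

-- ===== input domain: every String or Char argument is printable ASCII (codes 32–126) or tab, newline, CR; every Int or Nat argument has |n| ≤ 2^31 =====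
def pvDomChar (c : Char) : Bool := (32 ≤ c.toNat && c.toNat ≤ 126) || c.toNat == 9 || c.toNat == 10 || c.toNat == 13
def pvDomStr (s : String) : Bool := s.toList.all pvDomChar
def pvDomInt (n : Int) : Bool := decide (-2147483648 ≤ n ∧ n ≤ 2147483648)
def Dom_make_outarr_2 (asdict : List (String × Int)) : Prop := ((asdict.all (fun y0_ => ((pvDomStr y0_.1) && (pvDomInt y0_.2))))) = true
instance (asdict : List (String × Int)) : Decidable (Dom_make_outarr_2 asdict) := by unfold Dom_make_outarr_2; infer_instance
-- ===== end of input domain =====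

-- B replaces A's sort-keys-then-loop (dict lookups, placeholder-at-index-0 backfill) with an
-- online insertion sort: one pass over the items keeping the relevant pairs sorted by insertion.


-- ===== PORT A =====
-- "%s   %5d " % (key, v) : str(v) left-padded with spaces to width 5 (exact for %d)
def pvFmt (k : String) (v : Int) : String :=
  String.ofList (k.toList ++ [' ', ' ', ' ']
    ++ List.replicate (5 - (PySem.Int.toChars v).length) ' '
    ++ PySem.Int.toChars v ++ [' '])

-- '%s Total tags with attributes' % ntot
def pvHeader (n : Int) : String :=
  String.ofList (PySem.Int.toChars n ++ " Total tags with attributes".toList)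

-- A's for-loop over the sorted keys, carrying (outarr, ntot); branches in A's order.
def loopA (d : PySem.Dict String Int) : List String → List String → Int → List String × Int
  | [], outarr, ntot => (outarr, ntot)
  | key :: rest, outarr, ntot =>
    if PySem.Str.startswith key "</" then loopA d rest outarr ntot  -- skip closing tags
    else
      let asobj := d.getD key 0  -- asdict[key]: key ∈ keys so the lookup always succeeds
      if !(PySem.Str.isIn " " key) then loopA d rest outarr ntot    -- skip tags without attributes
      else loopA d rest (outarr ++ [pvFmt key asobj]) (ntot + asobj)

def make_outarr_2 (asdict : List (String × Int)) : List String :=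
  let d := PySem.Dict.ofList asdict
  let keys := PySem.List.sorted d.keys (fun k => k) false
  let r := loopA d keys [""] 0  -- outarr.append('')
  match r.1 with
  | [] => []                       -- unreachable: outarr starts with the placeholder
  | _ :: t => pvHeader r.2 :: t    -- outarr[0] = header

-- ===== PORT B =====
-- _insort: walk the sorted list, keep pairs whose key is <= k in front, insert (k, v) there
def insB (k : String) (v : Int) : List (String × Int) → List (String × Int)
  | [] => [(k, v)]
  | y :: ys => if y.1 ≤ k then y :: insB k v ys else (k, v) :: y :: ys

-- B's single pass over asdict.items(), carrying (lines, ntot)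
def loopB : List (String × Int) → List (String × Int) → Int → List (String × Int) × Int
  | [], lines, ntot => (lines, ntot)
  | (k, v) :: rest, lines, ntot =>
    if PySem.Str.startswith k "</" || !(PySem.Str.isIn " " k) then loopB rest lines ntot
    else loopB rest (insB k v lines) (ntot + v)

def make_outarr_2_alt (asdict : List (String × Int)) : List String :=
  let r := loopB (PySem.Dict.ofList asdict).items [] 0
  pvHeader r.2 :: r.1.map (fun p => pvFmt p.1 p.2)

-- ===== PRECONDITION & SPEC =====
def Spec_make_outarr_2 (asdict : List (String × Int)) (out : List String) : Prop := out = make_outarr_2_alt asdict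
instance (asdict : List (String × Int)) (out : List String) : Decidable (Spec_make_outarr_2 asdict out) := by unfold Spec_make_outarr_2; infer_instance

-- ===== CLAIM =====
def Claim_equal_make_outarr_2 : Prop := ∀ (asdict : List (String × Int)), Dom_make_outarr_2 asdict → Spec_make_outarr_2 asdict (make_outarr_2 asdict)

-- ===== LEMMAS AND PROOFS =====
-- the filter predicate, on a key and on an item
def pvKeep (k : String) : Bool := !(PySem.Str.startswith k "</") && PySem.Str.isIn " " k

theorem loopA_spec (d : PySem.Dict String Int) (L : List String) (outarr : List String) (ntot : Int) :
    loopA d L outarr ntot =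
      (outarr ++ ((L.filter pvKeep).map (fun k => pvFmt k (d.getD k 0))),
       ntot + ((L.filter pvKeep).map (fun k => d.getD k 0)).sum) := by
  induction L generalizing outarr ntot with
  | nil => simp [loopA]
  | cons key rest ih =>
    by_cases h1 : PySem.Chars.startswith key.toList ['<', '/'] = true
    · simp [loopA, pvKeep, h1, ih]
    · by_cases h2 : PySem.Chars.isIn [' '] key.toList = true
      · simp [loopA, pvKeep, h1, h2, ih]
        ring
      · simp only [Bool.not_eq_true] at h2
        simp [loopA, pvKeep, h1, h2, ih]

theorem insB_eq (k : String) (v : Int) (l : List (String × Int)) :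
    insB k v l = PySem.List.insertBy (fun a b => decide (a.1 < b.1)) (k, v) l := by
  induction l with
  | nil => rfl
  | cons y ys ih =>
    simp only [insB, PySem.List.insertBy]
    by_cases h : y.1 ≤ k
    · rw [if_pos h, ih,
        if_neg (fun hh => absurd (of_decide_eq_true hh) (not_lt.2 h))]
    · rw [if_neg h, if_pos (decide_eq_true (not_le.mp h))]

theorem loopB_spec (M : List (String × Int)) (lines : List (String × Int)) (ntot : Int) :
    loopB M lines ntot =
      ((M.filter (fun q => pvKeep q.1)).foldl
          (fun acc x => PySem.List.insertBy (fun a b => decide (a.1 < b.1)) x acc) lines,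
       ntot + ((M.filter (fun q => pvKeep q.1)).map (fun q => q.2)).sum) := by
  induction M generalizing lines ntot with
  | nil => simp [loopB]
  | cons q rest ih =>
    obtain ⟨k, v⟩ := q
    cases hs : PySem.Chars.startswith k.toList ['<', '/'] with
    | true => simp [loopB, pvKeep, hs, ih]
    | false =>
      cases hi : PySem.Chars.isIn [' '] k.toList with
      | false => simp [loopB, pvKeep, hs, hi, ih]
      | true => simp [loopB, pvKeep, hs, hi, ih, insB_eq, add_assoc]

-- sorting the relevant items by key = pairing the relevant sorted keys with their values
theorem sorted_items_filter (asdict : List (String × Int)) :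
    PySem.List.sorted ((PySem.Dict.ofList asdict).items.filter (fun q => pvKeep q.1)) (fun p => p.1) false =
      ((PySem.List.sorted (PySem.Dict.ofList asdict).keys (fun k => k) false).filter pvKeep).map
        (fun k => (k, (PySem.Dict.ofList asdict).getD k 0)) := by
  set d := PySem.Dict.ofList asdict with hd
  have hnd : d.keys.Nodup := PySem.Dict.nodup_keys_ofList asdict
  have hitems : d.items = d.keys.map (fun k => (k, d.getD k 0)) :=
    PySem.Dict.items_eq_map_keys d hnd 0
  apply PySem.List.sorted_eq_of_perm_of_pairwise_lt
  · -- permutation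
    have h1 : ((PySem.List.sorted d.keys (fun k => k) false).filter pvKeep).Perm
        (d.keys.filter pvKeep) :=
      (PySem.List.sorted_perm d.keys (fun k => k) false).filter pvKeep
    have h2 := h1.map (fun k => (k, d.getD k 0))
    refine h2.trans ?_
    rw [hitems, List.filter_map]
    exact (List.Perm.refl _)
  · -- strictly increasing keys
    rw [List.pairwise_map]
    apply List.Pairwise.filter
    have hle := PySem.List.sorted_pairwise d.keys (fun k => k)
    have hnd' : (PySem.List.sorted d.keys (fun k => k) false).Nodup :=
      ((PySem.List.sorted_perm d.keys (fun k => k) false).nodup_iff).mpr hnd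
    exact (hle.and hnd').imp (fun h => lt_of_le_of_ne h.1 h.2)

-- ===== VERDICT =====
theorem make_outarr_2_spec : Claim_equal_make_outarr_2 := by
  intro asdict _
  show make_outarr_2 asdict = make_outarr_2_alt asdict
  set d := PySem.Dict.ofList asdict with hd
  have hB := loopB_spec d.items [] 0
  rw [← PySem.List.sorted_eq_foldl_insertBy (d.items.filter (fun q => pvKeep q.1)) (fun p => p.1),
      sorted_items_filter] at hB
  have hitems : d.items = d.keys.map (fun k => (k, d.getD k 0)) :=
    PySem.Dict.items_eq_map_keys d (PySem.Dict.nodup_keys_ofList asdict) 0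
  have hsum : ((d.items.filter (fun q => pvKeep q.1)).map (fun q => q.2)).sum =
      (((PySem.List.sorted d.keys (fun k => k) false).filter pvKeep).map (fun k => d.getD k 0)).sum := by
    apply List.Perm.sum_eq
    have h1 : (d.keys.filter pvKeep).Perm
        ((PySem.List.sorted d.keys (fun k => k) false).filter pvKeep) :=
      ((PySem.List.sorted_perm d.keys (fun k => k) false).filter pvKeep).symm
    have h2 := h1.map (fun k => d.getD k 0)
    refine List.Perm.trans ?_ h2
    rw [hitems, List.filter_map, List.map_map]
    exact List.Perm.refl _
  simp only [make_outarr_2, make_outarr_2_alt, ← hd, loopA_spec, hB, hsum,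
    List.map_map, List.cons_append, List.nil_append, zero_add, Function.comp_def]
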